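-- pv_equiv track=rewrite | github.com/galejeee/verca-analyza-bunek | projekt 2/cells_analysis.py | calculate_growth_rate
-- ===== SOURCE A (Python) =====
-- def calculate_growth_rate(values):
--     differences = []
--     for i in range(len(values) - 1):
--         diff = values[i + 1] - values[i]
--         differences.append(diff)
--     if len(set(differences)) == 1:
--         return differences[0]
--     else:
--         return None
-- ===== SOURCE B (Python) =====
-- def calculate_growth_rate(values):
--     if len(values) < 2:
--         return None
--     first = values[1] - values[0]
--     prev = values[1]
--     for v in values[2:]:
--         if v - prev != first:
--             return None
--         prev = v
--     return first
-- ===== Notes on version B (the rewrite author's own statement) =====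
-- stated objective: simpler
-- what changed: Instead of materialising the full differences list and deduplicating it with a set, B keeps only the first difference and walks the list once with early exit on the first mismatch.
import Mathlib
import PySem

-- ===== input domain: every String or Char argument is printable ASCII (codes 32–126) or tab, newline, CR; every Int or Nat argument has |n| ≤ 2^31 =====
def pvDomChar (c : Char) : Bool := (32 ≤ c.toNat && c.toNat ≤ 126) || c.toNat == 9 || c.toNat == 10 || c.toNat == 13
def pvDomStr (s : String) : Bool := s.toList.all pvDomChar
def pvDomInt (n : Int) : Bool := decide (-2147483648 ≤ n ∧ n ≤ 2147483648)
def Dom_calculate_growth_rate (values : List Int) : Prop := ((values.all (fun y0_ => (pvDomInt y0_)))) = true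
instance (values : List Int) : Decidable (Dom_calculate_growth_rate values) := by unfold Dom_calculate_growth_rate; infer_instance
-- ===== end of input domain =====

-- B replaces A's differences list + set-deduplication by a single pass that keeps only
-- the first difference and exits early on the first mismatch (simpler, O(1) extra space).

-- ===== PORT A =====
def calculate_growth_rate (values : List Int) : Option Int :=
  let differences := (PySem.List.pyRange 0 ((values.length : Int) - 1) 1).foldl
    (fun acc i => acc ++ [PySem.List.pyGetD values (i + 1) 0 - PySem.List.pyGetD values i 0]) []
  if (PySem.Set.ofList differences).length == 1 then
    PySem.List.pyGet? differences 0
  else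
    none

-- ===== PORT B =====
def cgrLoop (first : Int) (prev : Int) : List Int → Option Int
  | [] => some first
  | v :: rest => if v - prev ≠ first then none else cgrLoop first v rest

def calculate_growth_rate_alt (values : List Int) : Option Int :=
  match values with
  | x :: y :: rest => cgrLoop (y - x) y rest
  | _ => none

-- ===== PRECONDITION & SPEC =====
def Spec_calculate_growth_rate (values : List Int) (out : Option Int) : Prop := out = calculate_growth_rate_alt values
instance (values : List Int) (out : Option Int) : Decidable (Spec_calculate_growth_rate values out) := by unfold Spec_calculate_growth_rate; infer_instance

-- ===== CLAIM (what is proved, stated in full; the proofs are below) =====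
def Claim_equal_calculate_growth_rate : Prop := ∀ (values : List Int), Dom_calculate_growth_rate values → Spec_calculate_growth_rate values (calculate_growth_rate values)

-- ===== LEMMAS AND PROOFS =====

/-- The pairwise-differences list of A, written structurally. -/
def pdiffs : List Int → List Int
  | x :: y :: r => (y - x) :: pdiffs (y :: r)
  | _ => []

lemma range_map_pdiffs : ∀ v : List Int,
    (List.range (v.length - 1)).map (fun k => v.getD (k + 1) 0 - v.getD k 0) = pdiffs v
  | [] => rfl
  | [_] => rfl
  | x :: y :: r => by
    have ih := range_map_pdiffs (y :: r)
    simp only [List.length_cons, Nat.add_sub_cancel, List.range_succ_eq_map, List.map_cons,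
      List.map_map] at *
    simp only [pdiffs]
    refine congrArg₂ List.cons ?_ ?_
    · simp [List.getD]
    · rw [← ih]
      apply List.map_congr_left
      intro k _
      simp [Function.comp, List.getD]

lemma differences_eq (v : List Int) :
    (PySem.List.pyRange 0 ((v.length : Int) - 1) 1).foldl
      (fun acc i => acc ++ [PySem.List.pyGetD v (i + 1) 0 - PySem.List.pyGetD v i 0]) []
      = pdiffs v := by
  rw [PySem.List.foldl_append_singleton_eq_map, PySem.List.pyRange_one, List.map_map]
  rw [← range_map_pdiffs v]
  have hlen : ((v.length : Int) - 1 - 0).toNat = v.length - 1 := by omega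
  rw [hlen]
  apply List.map_congr_left
  intro k _
  have h1 : (k : Int) + 1 = ((k + 1 : Nat) : Int) := by push_cast; ring
  simp only [Function.comp, zero_add, h1, PySem.List.pyGetD_natCast]

lemma ofList_len_one (d : Int) (rest : List Int) :
    ((PySem.Set.ofList (d :: rest)).length = 1) ↔ ∀ x ∈ rest, x = d := by
  constructor
  · intro h
    have hmem : ∀ x, x ∈ PySem.Set.ofList (d :: rest) ↔ x ∈ d :: rest :=
      fun x => PySem.Set.mem_ofList _ _
    obtain ⟨a, ha⟩ : ∃ a, PySem.Set.ofList (d :: rest) = [a] := by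
      match hs : PySem.Set.ofList (d :: rest) with
      | [a] => exact ⟨a, rfl⟩
      | [] => rw [hs] at h; simp at h
      | _ :: _ :: _ => rw [hs] at h; simp at h
    have hda : d = a := by
      have := (hmem d).mpr (by simp)
      rw [ha] at this; simpa using this
    intro x hx
    have := (hmem x).mpr (by simp [hx])
    rw [ha] at this; simp at this; omega
  · intro h
    have hall : ∀ x ∈ PySem.Set.ofList (d :: rest), x = d := by
      intro x hx
      have := (PySem.Set.mem_ofList _ _).mp hx
      rcases List.mem_cons.mp this with h1 | h2
      · exact h1
      · exact h x h2
    have hd : d ∈ PySem.Set.ofList (d :: rest) := (PySem.Set.mem_ofList _ _).mpr (by simp)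
    have hnd : (PySem.Set.ofList (d :: rest)).Nodup := PySem.Set.nodup_ofList _
    match hs : PySem.Set.ofList (d :: rest) with
    | [_] => rfl
    | [] => rw [hs] at hd; simp at hd
    | a :: b :: t =>
      rw [hs] at hall hnd
      have ha := hall a (by simp)
      have hb := hall b (by simp)
      rw [hs] at *
      simp [ha, hb] at hnd

lemma cgrLoop_eq : ∀ (l : List Int) (prev first : Int),
    cgrLoop first prev l =
      if ∀ x ∈ pdiffs (prev :: l), x = first then some first else none
  | [], _, _ => by simp [cgrLoop, pdiffs]
  | v :: rest, prev, first => by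
    rw [cgrLoop]
    by_cases h : v - prev = first
    · rw [if_neg (by simpa using h), cgrLoop_eq rest v first]
      simp [pdiffs, h]
    · rw [if_pos (by simpa using h)]
      rw [if_neg]
      intro hall
      exact h (hall (v - prev) (by simp [pdiffs]))

-- ===== VERDICT (by name: the statement is the Claim_ definition above) =====
theorem calculate_growth_rate_spec : Claim_equal_calculate_growth_rate := by
  intro values _
  show calculate_growth_rate values = calculate_growth_rate_alt values
  unfold calculate_growth_rate
  rw [differences_eq]
  match values with
  | [] => rfl
  | [_] => rfl
  | x :: y :: r =>
    rw [show pdiffs (x :: y :: r) = (y - x) :: pdiffs (y :: r) from rfl]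
    show (if ((PySem.Set.ofList ((y - x) :: pdiffs (y :: r))).length == 1) = true then
        PySem.List.pyGet? ((y - x) :: pdiffs (y :: r)) 0 else none) = cgrLoop (y - x) y r
    rw [cgrLoop_eq]
    by_cases h : ∀ z ∈ pdiffs (y :: r), z = y - x
    · rw [if_pos h, if_pos (by simpa using (ofList_len_one (y - x) (pdiffs (y :: r))).mpr h)]
      simp [PySem.List.pyGet?, PySem.List.pyIdx?]
    · rw [if_neg h, if_neg]
      intro hc
      exact h ((ofList_len_one (y - x) (pdiffs (y :: r))).mp (by simpa using hc))
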